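-- pv_equiv track=rewrite | github.com/JustFixNYC/tenants2 | project/tests/test_dev_prod_parity.py | strip_leading_comments
-- ===== SOURCE A (Python) =====
-- def strip_leading_comments(text):
--     lines = []
--     found_end_of_leading_comments = False
--     for line in text.splitlines():
--         if line.startswith("#") and not found_end_of_leading_comments:
--             pass
--         else:
--             found_end_of_leading_comments = True
--             lines.append(line)
--     return "\n".join(lines)
-- ===== SOURCE B (Python) =====
-- def strip_leading_comments(text):
--     lines = text.splitlines()
--     while lines and lines[0].startswith("#"):
--         lines = lines[1:]
--     return "\n".join(lines)
-- ===== Notes on version B (the rewrite author's own statement) =====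
-- stated objective: simpler
-- what changed: B discards the leading run of comment lines by repeatedly stripping the head of the line list and then joins the tail, removing A's found_end_of_leading_comments flag and per-line append loop.
import Mathlib
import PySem

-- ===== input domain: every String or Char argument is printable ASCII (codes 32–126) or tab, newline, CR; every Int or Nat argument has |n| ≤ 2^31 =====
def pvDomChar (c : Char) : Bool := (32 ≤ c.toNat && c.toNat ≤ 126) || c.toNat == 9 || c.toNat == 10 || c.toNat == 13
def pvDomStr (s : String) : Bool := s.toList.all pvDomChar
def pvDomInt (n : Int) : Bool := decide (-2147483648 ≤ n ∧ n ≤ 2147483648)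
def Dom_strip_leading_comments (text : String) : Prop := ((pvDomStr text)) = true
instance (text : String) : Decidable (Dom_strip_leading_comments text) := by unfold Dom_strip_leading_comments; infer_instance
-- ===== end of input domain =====

-- B drops the leading run of lines starting with a hash and joins the tail, removing A's flag/append loop (objective: simpler).

-- ===== PORT A =====
-- the loop body: state = (found_end_of_leading_comments, lines)
def sacStep (s : Bool × List String) (line : String) : Bool × List String :=
  if PySem.Str.startswith line "#" && !s.1 then s else (true, s.2 ++ [line])

def strip_leading_comments (text : String) : String :=
  PySem.Str.join "\n" (((PySem.Str.splitlines text).foldl sacStep (false, [])).2)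

-- ===== PORT B =====
-- the while loop: strip the head while it startswith "#"
def sacDrop : List String → List String
  | [] => []
  | l :: ls => if PySem.Str.startswith l "#" then sacDrop ls else l :: ls

def strip_leading_comments_alt (text : String) : String :=
  PySem.Str.join "\n" (sacDrop (PySem.Str.splitlines text))

-- ===== PRECONDITION & SPEC =====
def Spec_strip_leading_comments (text : String) (out : String) : Prop := out = strip_leading_comments_alt text
instance (text : String) (out : String) : Decidable (Spec_strip_leading_comments text out) := by unfold Spec_strip_leading_comments; infer_instance

-- ===== CLAIM (what is proved, stated in full; the proofs are below) =====
def Claim_equal_strip_leading_comments : Prop := ∀ (text : String), Dom_strip_leading_comments text → Spec_strip_leading_comments text (strip_leading_comments text)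

-- ===== LEMMAS AND PROOFS =====
theorem sac_fold_true (ls : List String) (acc : List String) :
    (ls.foldl sacStep (true, acc)).2 = acc ++ ls := by
  induction ls generalizing acc with
  | nil => simp
  | cons l ls ih => simp [sacStep, ih]

theorem sac_fold_false (ls : List String) (acc : List String) :
    (ls.foldl sacStep (false, acc)).2 = acc ++ sacDrop ls := by
  induction ls generalizing acc with
  | nil => simp [sacDrop]
  | cons l ls ih =>
    by_cases h : PySem.Chars.startswith l.toList ['#'] = true
    · simp [sacStep, PySem.Str.startswith, h, sacDrop, ih]
    · simp [sacStep, PySem.Str.startswith, h, sacDrop, sac_fold_true]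

-- ===== VERDICT (by name: the statement is the Claim_ definition above) =====
theorem strip_leading_comments_spec : Claim_equal_strip_leading_comments := by
  intro text _
  unfold Spec_strip_leading_comments strip_leading_comments strip_leading_comments_alt
  rw [sac_fold_false]
  simp
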